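-- pv_equiv track=rewrite | github.com/bioscan-ml/dataset | bioscan_dataset/CanadianInvertebrate1-5m.py | explode_metasplit
-- ===== SOURCE A (Python) =====
-- from typing import Any, Callable, Iterable, List, Optional, Set, Tuple, Union
--
-- VALID_SPLITS = ["pretrain", "train", "val", "test", "key_unseen", "val_unseen", "test_unseen", "other_heldout"]
--
-- SPLIT_ALIASES = {"validation": "val"}
--
-- VALID_METASPLITS = ["all", "seen", "unseen"]
--
-- SEEN_SPLITS = ["train", "val", "test"]
--
-- UNSEEN_SPLITS = ["key_unseen", "val_unseen", "test_unseen"]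
--
-- def explode_metasplit(metasplit: str, verify: bool = False) -> Set[str]:
--
--     r"""
--     Convert a metasplit string into its set of constituent splits.
--
--     .. versionadded:: 1.2.0
--
--     Parameters
--     ----------
--     metasplit : str
--         The metasplit to explode.
--     verify : bool, default=False
--         If ``True``, verify that the constitutent splits are valid.
--
--     Returns
--     -------
--     set of str
--         The canonical splits within the metasplit.
--
--     Examples
--     --------
--     >>> explode_metasplit("pretrain+train")
--     {'pretrain', 'train'}
--     >>> explode_metasplit("seen")
--     {'train', 'val', 'test'}
--     >>> explode_metasplit("train")
--     {'train'}
--     >>> explode_metasplit("validation")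
--     {'val'}
--     """
--     if metasplit is None:
--         metasplit = "all"
--     split_list = [s.strip() for s in metasplit.split("+")]
--     split_list = [SPLIT_ALIASES.get(s, s) for s in split_list]
--     split_set = set(split_list)
--     if "all" in split_list:
--         split_set.remove("all")
--         split_set |= set(VALID_SPLITS)
--     if "seen" in split_list:
--         split_set.remove("seen")
--         split_set |= set(SEEN_SPLITS)
--     if "unseen" in split_list:
--         split_set.remove("unseen")
--         split_set |= set(UNSEEN_SPLITS)
--
--     if verify:
--         # Verify the constituent splits are valid
--         invalid_splits = split_set - set(VALID_SPLITS)
--         if invalid_splits: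
--             msg_valid_names = f"Valid split names are: {', '.join(repr(s) for s in VALID_METASPLITS + VALID_SPLITS)}."
--             if split_set == {metasplit}:
--                 raise ValueError(f"Invalid split name {repr(metasplit)}. {msg_valid_names}")
--             plural = "s" if len(invalid_splits) > 1 else ""
--             raise ValueError(
--                 f"Invalid split name{plural} {', '.join(repr(s) for s in invalid_splits)} within requested metasplit"
--                 f" {repr(metasplit)}. {msg_valid_names}"
--             )
--
--     return split_set
-- ===== SOURCE B (Python) =====
-- # B: characterization-based construction — instead of mutating a set through three
-- # remove-keyword/union-expansion passes, B defines a membership predicate `wanted`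
-- # (what the final set must contain) and builds the result as one filtered
-- # comprehension over the candidate pool tokens + VALID_SPLITS (objective: alternative).
-- VALID_SPLITS = ["pretrain", "train", "val", "test", "key_unseen", "val_unseen", "test_unseen", "other_heldout"]
-- SPLIT_ALIASES = {"validation": "val"}
-- VALID_METASPLITS = ["all", "seen", "unseen"]
-- SEEN_SPLITS = ["train", "val", "test"]
-- UNSEEN_SPLITS = ["key_unseen", "val_unseen", "test_unseen"]
--
-- def explode_metasplit(metasplit, verify=False):
--     if metasplit is None:
--         metasplit = "all"
--     tokens = [SPLIT_ALIASES.get(s.strip(), s.strip()) for s in metasplit.split("+")]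
--
--     def wanted(c):
--         # c belongs to the exploded set iff it is a non-keyword requested token,
--         # or a valid split pulled in by a requested metasplit keyword.
--         if c in VALID_METASPLITS:
--             return False
--         if c in tokens:
--             return True
--         return (("all" in tokens and c in VALID_SPLITS)
--                 or ("seen" in tokens and c in SEEN_SPLITS)
--                 or ("unseen" in tokens and c in UNSEEN_SPLITS))
--
--     split_set = {c for c in tokens + VALID_SPLITS if wanted(c)}
--
--     if verify:
--         # Verify the constituent splits are valid
--         invalid_splits = split_set - set(VALID_SPLITS)
--         if invalid_splits:
--             msg_valid_names = f"Valid split names are: {', '.join(repr(s) for s in VALID_METASPLITS + VALID_SPLITS)}."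
--             if split_set == {metasplit}:
--                 raise ValueError(f"Invalid split name {repr(metasplit)}. {msg_valid_names}")
--             plural = "s" if len(invalid_splits) > 1 else ""
--             raise ValueError(
--                 f"Invalid split name{plural} {', '.join(repr(s) for s in invalid_splits)} within requested metasplit"
--                 f" {repr(metasplit)}. {msg_valid_names}"
--             )
--
--     return split_set
-- ===== Notes on version B (the rewrite author's own statement) =====
-- stated objective: alternative
-- what changed: A mutates a set through three staged remove-keyword/union-expansion passes; B instead defines a membership predicate `wanted` characterising the final set and builds it in one filtered comprehension over the candidate pool tokens + VALID_SPLITS; the verify block is kept byte-for-byte.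
import Mathlib
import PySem

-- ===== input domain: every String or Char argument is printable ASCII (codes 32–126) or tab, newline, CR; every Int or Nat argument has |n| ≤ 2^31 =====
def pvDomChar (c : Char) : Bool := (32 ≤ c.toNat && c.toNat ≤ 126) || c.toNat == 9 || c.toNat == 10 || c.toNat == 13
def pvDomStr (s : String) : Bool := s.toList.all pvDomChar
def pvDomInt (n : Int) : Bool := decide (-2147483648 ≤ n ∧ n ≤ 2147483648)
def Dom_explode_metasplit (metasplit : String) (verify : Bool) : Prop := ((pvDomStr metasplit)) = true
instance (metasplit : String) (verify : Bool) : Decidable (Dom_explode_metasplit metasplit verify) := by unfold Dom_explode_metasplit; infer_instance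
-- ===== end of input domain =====

-- B builds the result set by a single filtered comprehension over the candidate pool
-- tokens + VALID_SPLITS, driven by a membership predicate `wanted` that characterises the
-- final set, instead of A's three remove-keyword/union-expansion passes (objective: alternative).
-- Python A raises ValueError when verify=True and an invalid split is requested; those
-- inputs are outside Pre_ (both ports return [] there in place of the exception).

-- ===== PORT A =====
def VALID_SPLITS : List String :=
  ["pretrain", "train", "val", "test", "key_unseen", "val_unseen", "test_unseen", "other_heldout"]

def SPLIT_ALIASES : PySem.Dict String String := PySem.Dict.ofList [("validation", "val")]

def VALID_METASPLITS : List String := ["all", "seen", "unseen"]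

def SEEN_SPLITS : List String := ["train", "val", "test"]

def UNSEEN_SPLITS : List String := ["key_unseen", "val_unseen", "test_unseen"]

def explode_metasplit (metasplit : String) (verify : Bool) : List String :=
  -- (metasplit is a String here, so Python's 'if metasplit is None' branch cannot fire)
  let split_list := ((PySem.Str.split? metasplit "+").getD []).map (fun s => PySem.Str.strip s)
  let split_list := split_list.map (fun s => PySem.Dict.getD SPLIT_ALIASES s s)
  let split_set : PySem.Set String := PySem.Set.ofList split_list
  -- set.remove: the guard ensures the element is present, so remove = discard
  let split_set := if split_list.contains "all" then
      PySem.Set.union (PySem.Set.discard split_set "all") (PySem.Set.ofList VALID_SPLITS) else split_set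
  let split_set := if split_list.contains "seen" then
      PySem.Set.union (PySem.Set.discard split_set "seen") (PySem.Set.ofList SEEN_SPLITS) else split_set
  let split_set := if split_list.contains "unseen" then
      PySem.Set.union (PySem.Set.discard split_set "unseen") (PySem.Set.ofList UNSEEN_SPLITS) else split_set
  if verify then
    let invalid_splits := PySem.Set.diff split_set (PySem.Set.ofList VALID_SPLITS)
    if invalid_splits ≠ [] then
      [] -- Python raises ValueError here; these inputs are excluded by Pre_
    else split_set
  else split_set

-- ===== PORT B =====
-- the membership predicate `wanted` of Source B, with the token list as a parameter
def pvWanted (tokens : List String) (c : String) : Bool :=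
  if VALID_METASPLITS.contains c then false
  else if tokens.contains c then true
  else ((tokens.contains "all" && VALID_SPLITS.contains c)
     || (tokens.contains "seen" && SEEN_SPLITS.contains c)
     || (tokens.contains "unseen" && UNSEEN_SPLITS.contains c))

def explode_metasplit_alt (metasplit : String) (verify : Bool) : List String :=
  let tokens := ((PySem.Str.split? metasplit "+").getD []).map
      (fun s => PySem.Dict.getD SPLIT_ALIASES (PySem.Str.strip s) (PySem.Str.strip s))
  let split_set : PySem.Set String :=
      PySem.Set.ofList ((tokens ++ VALID_SPLITS).filter (pvWanted tokens))
  if verify then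
    let invalid_splits := PySem.Set.diff split_set (PySem.Set.ofList VALID_SPLITS)
    if invalid_splits ≠ [] then
      [] -- Python raises ValueError here; these inputs are excluded by Pre_
    else split_set
  else split_set

-- ===== PRECONDITION & SPEC =====
-- Pre_ excludes exactly the inputs on which Python A raises ValueError: verify=True with
-- some (stripped, alias-normalised) token that is neither a metasplit nor a valid split.
def Pre_explode_metasplit (metasplit : String) (verify : Bool) : Prop :=
  verify = true → ∀ s ∈ (PySem.Str.split? metasplit "+").getD [],
    PySem.Dict.getD SPLIT_ALIASES (PySem.Str.strip s) (PySem.Str.strip s) ∈ VALID_METASPLITS ++ VALID_SPLITS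
instance (metasplit : String) (verify : Bool) : Decidable (Pre_explode_metasplit metasplit verify) := by
  unfold Pre_explode_metasplit; infer_instance
def pvWitness_explode_metasplit : String × Bool := ("seen+validation", true)
def Spec_explode_metasplit (metasplit : String) (verify : Bool) (out : List String) : Prop := out = explode_metasplit_alt metasplit verify
instance (metasplit : String) (verify : Bool) (out : List String) : Decidable (Spec_explode_metasplit metasplit verify out) := by unfold Spec_explode_metasplit; infer_instance

-- ===== CLAIM (what is proved, stated in full; the proofs are below) =====
def Claim_equal_explode_metasplit : Prop := ∀ (metasplit : String) (verify : Bool), Dom_explode_metasplit metasplit verify → Pre_explode_metasplit metasplit verify → Spec_explode_metasplit metasplit verify (explode_metasplit metasplit verify)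

-- ===== LEMMAS AND PROOFS =====

theorem pv_add_filter_false {s : PySem.Set String} {p : String → Bool} {t : String}
    (hp : p t = false) : (PySem.Set.add s t).filter p = s.filter p := by
  unfold PySem.Set.add
  split <;> simp [List.filter_append, hp]

theorem pv_add_filter_true {s : PySem.Set String} {p : String → Bool} {t : String}
    (hp : p t = true) : (PySem.Set.add s t).filter p = PySem.Set.add (s.filter p) t := by
  unfold PySem.Set.add
  by_cases h : t ∈ s <;> simp [h, hp, List.filter_append, List.mem_filter]

theorem pv_foldl_add_filter (ts : List String) (p : String → Bool) :
    ∀ s : PySem.Set String,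
      (ts.filter p).foldl PySem.Set.add (s.filter p) = (ts.foldl PySem.Set.add s).filter p := by
  induction ts with
  | nil => intro s; simp
  | cons t ts ih =>
    intro s
    by_cases hp : p t
    · simp only [List.filter, hp, List.foldl]
      rw [← pv_add_filter_true hp, ih]
    · simp only [List.filter, eq_false_of_ne_true hp, List.foldl]
      rw [← pv_add_filter_false (eq_false_of_ne_true hp), ih]

theorem pv_ofList_filter (ts : List String) (p : String → Bool) :
    PySem.Set.ofList (ts.filter p) = (PySem.Set.ofList ts).filter p := by
  have := pv_foldl_add_filter ts p PySem.Set.empty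
  simpa [PySem.Set.ofList, PySem.Set.empty] using this

theorem pv_discard_eq_filter (s : PySem.Set String) (k : String) :
    PySem.Set.discard s k = s.filter (fun y => !(y == k)) := rfl

theorem pv_discard_of_not_mem {s : PySem.Set String} {k : String}
    (h : k ∉ s) : PySem.Set.discard s k = s := by
  rw [pv_discard_eq_filter]
  apply List.filter_eq_self.2
  intro y hy
  simp only [Bool.not_eq_true', beq_eq_false_iff_ne]
  rintro rfl
  exact h hy

-- the three keyword-expansion steps of port A, as one function
def pvStep (ts : List String) (kw : String) (exp : List String) (s : PySem.Set String) :
    PySem.Set String :=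
  if ts.contains kw then PySem.Set.union s exp else s

-- PySem.Set.update adds nothing when every element is already present
theorem pv_update_id {s : PySem.Set String} {l : List String}
    (h : ∀ x ∈ l, x ∈ s) : PySem.Set.update s l = s := by
  rw [PySem.Set.update_eq_append_filter]
  have hnil : (PySem.Set.ofList l).filter (fun y => !(PySem.Set.contains s y)) = [] := by
    apply List.filter_eq_nil_iff.2
    intro y hy
    have hyl : y ∈ l := (PySem.Set.mem_ofList l y).1 hy
    simpa using h y hyl
  rw [hnil, List.append_nil]

theorem pv_ofList_of_nodup {l : List String} (h : l.Nodup) : PySem.Set.ofList l = l := by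
  rw [← PySem.Set.update_nil_left]
  have := PySem.Set.update_eq_append_of_disjoint ([] : PySem.Set String) l h
    (fun x _ => List.not_mem_nil)
  simpa using this

-- the central bridge: updating by a filter over a duplicate-free pool V equals updating by
-- the expansion list E it selects, once elements already in s are discounted
theorem pv_update_filter_eq {s : PySem.Set String} {q : String → Bool}
    (V E : List String) (hV : V.Nodup)
    (hVE : V.filter (fun c => E.contains c) = E)
    (hq : ∀ c ∈ V, q c = PySem.Set.contains s c) :
    PySem.Set.update s (V.filter (fun c => q c || E.contains c)) = PySem.Set.update s E := by
  have hE : PySem.Set.ofList E = E := by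
    rw [← hVE]; exact pv_ofList_of_nodup (hV.filter _)
  have hF := pv_ofList_of_nodup (l := V.filter (fun c => q c || E.contains c)) (hV.filter _)
  rw [PySem.Set.update_eq_append_filter, PySem.Set.update_eq_append_filter (xs := E), hE, hF]
  congr 1
  rw [show E.filter (fun y => !(PySem.Set.contains s y))
      = (V.filter (fun c => E.contains c)).filter (fun y => !(PySem.Set.contains s y)) from by
    rw [hVE]]
  rw [List.filter_filter, List.filter_filter]
  apply List.filter_congr
  intro c hc
  rw [hq c hc]
  cases h : PySem.Set.contains s c <;> simp

theorem pv_step_discard (ts : List String) (kw : String) (exp : List String)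
    (s : PySem.Set String) (hkw : kw ∈ s ↔ kw ∈ ts) :
    (if ts.contains kw then PySem.Set.union (PySem.Set.discard s kw) exp else s)
      = pvStep ts kw exp (PySem.Set.discard s kw) := by
  unfold pvStep
  by_cases h : kw ∈ ts
  · simp [h]
  · simp [h, pv_discard_of_not_mem (fun hm => h (hkw.1 hm))]

theorem pv_update_filter {p : String → Bool} (l : List String) (hl : ∀ x ∈ l, p x = true)
    (s : PySem.Set String) :
    (PySem.Set.update s l).filter p = PySem.Set.update (s.filter p) l := by
  induction l generalizing s with
  | nil => simp [PySem.Set.update]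
  | cons x xs ih =>
    have hx : p x = true := hl x (by simp)
    simp only [PySem.Set.update_cons]
    rw [ih (fun y hy => hl y (by simp [hy])), pv_add_filter_true hx]

theorem pv_discard_union {s : PySem.Set String} {k : String} (l : List String)
    (hl : ∀ x ∈ l, x ≠ k) :
    PySem.Set.discard (PySem.Set.union s l) k = PySem.Set.union (PySem.Set.discard s k) l := by
  simp only [PySem.Set.union, pv_discard_eq_filter]
  exact pv_update_filter l (fun x hx => by simp [hl x hx]) s

theorem pv_step_discard_comm (ts : List String) (kw kw' : String) (exp' : List String)
    (s : PySem.Set String) (hexp : ∀ x ∈ exp', x ≠ kw) :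
    PySem.Set.discard (pvStep ts kw' exp' s) kw = pvStep ts kw' exp' (PySem.Set.discard s kw) := by
  unfold pvStep
  by_cases h : kw' ∈ ts <;> simp [h, pv_discard_union exp' hexp]

theorem pv_mem_step (ts : List String) (kw' : String) (exp' : List String)
    (s : PySem.Set String) (a : String) :
    a ∈ pvStep ts kw' exp' s ↔ (a ∈ s ∨ (kw' ∈ ts ∧ a ∈ exp')) := by
  unfold pvStep
  by_cases h : kw' ∈ ts <;> simp [h, PySem.Set.mem_union]

theorem pvStep_pos {ts : List String} {kw : String} {e : List String} {s : PySem.Set String}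
    (h : ts.contains kw = true) : pvStep ts kw e s = PySem.Set.union s e := by
  unfold pvStep; rw [if_pos h]

theorem pvStep_neg {ts : List String} {kw : String} {e : List String} {s : PySem.Set String}
    (h : ¬ ts.contains kw = true) : pvStep ts kw e s = s := by
  unfold pvStep; rw [if_neg h]

-- keyword-free tokens, the base set both algorithms start from
def pvNk (t : String) : Bool := !(VALID_METASPLITS.contains t)

theorem pv_mem_base (ts : List String) (c : String) :
    c ∈ PySem.Set.ofList (ts.filter pvNk) ↔ c ∈ ts ∧ pvNk c := by
  rw [PySem.Set.mem_ofList, List.mem_filter]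

-- A's chain of remove+union branches equals B's single filtered comprehension
theorem pv_core_eq (ts : List String) :
    (let s0 := PySem.Set.ofList ts
     let s1 := if ts.contains "all" then
         PySem.Set.union (PySem.Set.discard s0 "all") (PySem.Set.ofList VALID_SPLITS) else s0
     let s2 := if ts.contains "seen" then
         PySem.Set.union (PySem.Set.discard s1 "seen") (PySem.Set.ofList SEEN_SPLITS) else s1
     let s3 := if ts.contains "unseen" then
         PySem.Set.union (PySem.Set.discard s2 "unseen") (PySem.Set.ofList UNSEEN_SPLITS) else s2
     s3)
    = PySem.Set.ofList ((ts ++ VALID_SPLITS).filter (pvWanted ts)) := by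
  simp only []
  -- ===== left side: turn the chain into pvStep applications over the keyword-free base =====
  rw [pv_step_discard ts "all" (PySem.Set.ofList VALID_SPLITS) _
    (by simp [PySem.Set.mem_ofList])]
  rw [pv_step_discard ts "seen" (PySem.Set.ofList SEEN_SPLITS) _ ?hseen]
  case hseen =>
    simp [pv_mem_step, PySem.Set.mem_discard, PySem.Set.mem_ofList, VALID_SPLITS]
  rw [pv_step_discard ts "unseen" (PySem.Set.ofList UNSEEN_SPLITS) _ ?hunseen]
  case hunseen =>
    simp [pv_mem_step, PySem.Set.mem_discard, PySem.Set.mem_ofList, VALID_SPLITS, SEEN_SPLITS]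
  rw [pv_step_discard_comm ts "seen" "all" _ _ (by simp [PySem.Set.mem_ofList, VALID_SPLITS])]
  rw [pv_step_discard_comm ts "unseen" "seen" _ _ (by simp [PySem.Set.mem_ofList, SEEN_SPLITS])]
  rw [pv_step_discard_comm ts "unseen" "all" _ _ (by simp [PySem.Set.mem_ofList, VALID_SPLITS])]
  have hbase : PySem.Set.discard (PySem.Set.discard (PySem.Set.discard (PySem.Set.ofList ts) "all") "seen") "unseen"
      = PySem.Set.ofList (ts.filter pvNk) := by
    simp only [pv_discard_eq_filter, List.filter_filter, pv_ofList_filter]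
    congr 1
    funext t
    have hc : VALID_METASPLITS.contains t = (t == "all" || (t == "seen" || t == "unseen")) := by
      simp only [VALID_METASPLITS, List.contains_cons, List.contains_nil, Bool.or_false]
    unfold pvNk
    rw [hc]
    cases t == "all" <;> cases t == "seen" <;> cases t == "unseen" <;> rfl
  rw [hbase]
  -- ===== right side: split the pool, reduce the token half to the keyword-free base =====
  rw [List.filter_append, PySem.Set.ofList_append]
  have htok : ts.filter (pvWanted ts) = ts.filter pvNk := by
    apply List.filter_congr
    intro t ht
    have hmem : ts.contains t = true := by simpa using ht
    unfold pvWanted pvNk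
    rw [hmem]
    cases h : VALID_METASPLITS.contains t <;> simp
  rw [htok]
  -- ===== case analysis on which keywords occur among the tokens =====
  have hV : PySem.Set.ofList VALID_SPLITS = VALID_SPLITS := by decide
  have hS : PySem.Set.ofList SEEN_SPLITS = SEEN_SPLITS := by decide
  have hU : PySem.Set.ofList UNSEEN_SPLITS = UNSEEN_SPLITS := by decide
  have hVnd : VALID_SPLITS.Nodup := by decide
  set base := PySem.Set.ofList (ts.filter pvNk) with hbdef
  have hcb : ∀ c ∈ VALID_SPLITS, PySem.Set.contains base c = ts.contains c := by
    intro c hc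
    have hnk : pvNk c = true := by fin_cases hc <;> decide
    cases h : ts.contains c
    · have hnot : c ∉ ts := by simpa using h
      have hnb : c ∉ base := fun hm => hnot ((pv_mem_base ts c).1 hm).1
      exact Bool.eq_false_iff.mpr (fun hct => hnb ((PySem.Set.contains_iff base c).1 hct))
    · have hm : c ∈ ts := by simpa using h
      exact (PySem.Set.contains_iff base c).2 ((pv_mem_base ts c).2 ⟨hm, hnk⟩)
  have hq : ∀ E : List String, ∀ c ∈ VALID_SPLITS,
      (ts.contains c || E.contains c) = (PySem.Set.contains base c || E.contains c) := by
    intro E c hc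
    rw [hcb c hc]
  by_cases ha : ts.contains "all"
  · -- "all" requested: every valid split is wanted, and the later unions add nothing
    have ha' : "all" ∈ ts := by simpa using ha
    have hw : VALID_SPLITS.filter (pvWanted ts)
        = VALID_SPLITS.filter (fun c => PySem.Set.contains base c || VALID_SPLITS.contains c) := by
      refine List.filter_congr ?_
      intro c hc
      rw [← hq VALID_SPLITS c hc]
      have h1 : c ∉ VALID_METASPLITS := by fin_cases hc <;> decide
      by_cases hts : c ∈ ts <;> simp [pvWanted, h1, hc, hts, ha']
    rw [hw, pv_update_filter_eq VALID_SPLITS VALID_SPLITS hVnd (by decide) (fun c _ => rfl)]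
    have hAll : ∀ x ∈ VALID_SPLITS, x ∈ PySem.Set.update base VALID_SPLITS := by
      intro x hx; exact (PySem.Set.mem_update base VALID_SPLITS x).2 (Or.inr hx)
    have h1 : pvStep ts "all" (PySem.Set.ofList VALID_SPLITS) base
        = PySem.Set.update base VALID_SPLITS := by
      rw [pvStep_pos ha]; simp only [PySem.Set.union]; rw [hV]
    rw [h1]
    have h2 : pvStep ts "seen" (PySem.Set.ofList SEEN_SPLITS) (PySem.Set.update base VALID_SPLITS)
        = PySem.Set.update base VALID_SPLITS := by
      by_cases hsn : ts.contains "seen"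
      · rw [pvStep_pos hsn]; simp only [PySem.Set.union]; rw [hS]
        exact pv_update_id (fun x hx => hAll x (by fin_cases hx <;> decide))
      · exact pvStep_neg hsn
    rw [h2]
    by_cases hun : ts.contains "unseen"
    · rw [pvStep_pos hun]; simp only [PySem.Set.union]; rw [hU]
      exact pv_update_id (fun x hx => hAll x (by fin_cases hx <;> decide))
    · exact pvStep_neg hun
  · have ha' : "all" ∉ ts := by simpa using ha
    by_cases hs : ts.contains "seen" <;> by_cases hu : ts.contains "unseen"
    · -- seen and unseen
      have hs' : "seen" ∈ ts := by simpa using hs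
      have hu' : "unseen" ∈ ts := by simpa using hu
      have hw : VALID_SPLITS.filter (pvWanted ts)
          = VALID_SPLITS.filter
              (fun c => PySem.Set.contains base c || (SEEN_SPLITS ++ UNSEEN_SPLITS).contains c) := by
        refine List.filter_congr ?_
        intro c hc
        rw [← hq (SEEN_SPLITS ++ UNSEEN_SPLITS) c hc]
        have h1 : c ∉ VALID_METASPLITS := by fin_cases hc <;> decide
        by_cases hts : c ∈ ts <;> fin_cases hc <;> simp [pvWanted, h1, hts, ha', hs', hu']
      rw [hw, pv_update_filter_eq VALID_SPLITS (SEEN_SPLITS ++ UNSEEN_SPLITS) hVnd (by decide)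
        (fun c _ => rfl)]
      rw [pvStep_neg ha, pvStep_pos hs, pvStep_pos hu]
      simp only [PySem.Set.union]
      rw [hS, hU, PySem.Set.update_append]
    · -- seen only
      have hs' : "seen" ∈ ts := by simpa using hs
      have hu' : "unseen" ∉ ts := by simpa using hu
      have hw : VALID_SPLITS.filter (pvWanted ts)
          = VALID_SPLITS.filter (fun c => PySem.Set.contains base c || SEEN_SPLITS.contains c) := by
        refine List.filter_congr ?_
        intro c hc
        rw [← hq SEEN_SPLITS c hc]
        have h1 : c ∉ VALID_METASPLITS := by fin_cases hc <;> decide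
        by_cases hts : c ∈ ts <;> fin_cases hc <;> simp [pvWanted, h1, hts, ha', hs', hu']
      rw [hw, pv_update_filter_eq VALID_SPLITS SEEN_SPLITS hVnd (by decide) (fun c _ => rfl)]
      rw [pvStep_neg ha, pvStep_pos hs, pvStep_neg hu]
      simp only [PySem.Set.union]
      rw [hS]
    · -- unseen only
      have hs' : "seen" ∉ ts := by simpa using hs
      have hu' : "unseen" ∈ ts := by simpa using hu
      have hw : VALID_SPLITS.filter (pvWanted ts)
          = VALID_SPLITS.filter (fun c => PySem.Set.contains base c || UNSEEN_SPLITS.contains c) := by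
        refine List.filter_congr ?_
        intro c hc
        rw [← hq UNSEEN_SPLITS c hc]
        have h1 : c ∉ VALID_METASPLITS := by fin_cases hc <;> decide
        by_cases hts : c ∈ ts <;> fin_cases hc <;> simp [pvWanted, h1, hts, ha', hs', hu']
      rw [hw, pv_update_filter_eq VALID_SPLITS UNSEEN_SPLITS hVnd (by decide) (fun c _ => rfl)]
      rw [pvStep_neg ha, pvStep_neg hs, pvStep_pos hu]
      simp only [PySem.Set.union]
      rw [hU]
    · -- no keyword at all: every wanted valid split is already a token, so nothing is added
      have hs' : "seen" ∉ ts := by simpa using hs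
      have hu' : "unseen" ∉ ts := by simpa using hu
      have hw : VALID_SPLITS.filter (pvWanted ts)
          = VALID_SPLITS.filter
              (fun c => PySem.Set.contains base c || ([] : List String).contains c) := by
        refine List.filter_congr ?_
        intro c hc
        rw [← hq [] c hc]
        have h1 : c ∉ VALID_METASPLITS := by fin_cases hc <;> decide
        by_cases hts : c ∈ ts <;> fin_cases hc <;> simp [pvWanted, h1, hts, ha', hs', hu']
      rw [hw, pv_update_filter_eq VALID_SPLITS [] hVnd (by decide) (fun c _ => rfl)]
      rw [pvStep_neg ha, pvStep_neg hs, pvStep_neg hu]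
      rfl

-- ===== VERDICT (by name: the statement is the Claim_ definition above) =====
theorem explode_metasplit_spec : Claim_equal_explode_metasplit := by
  intro metasplit verify _ _
  unfold Spec_explode_metasplit explode_metasplit explode_metasplit_alt
  simp only [List.map_map]
  rw [show ((fun s => PySem.Dict.getD SPLIT_ALIASES s s) ∘ fun s => PySem.Str.strip s)
      = (fun s => PySem.Dict.getD SPLIT_ALIASES (PySem.Str.strip s) (PySem.Str.strip s)) from rfl]
  have h := pv_core_eq (((PySem.Str.split? metasplit "+").getD []).map
      (fun s => PySem.Dict.getD SPLIT_ALIASES (PySem.Str.strip s) (PySem.Str.strip s)))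
  simp only [] at h
  rw [h]
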